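-- pv_equiv track=rewrite | github.com/SoftwareGodfather/technical_intervew_questions | LongestSubSequence.py | MapLocations
-- ===== SOURCE A (Python) =====
-- def MapLocations(myStr):
--     loc = dict()
--     for ind, elem in enumerate(myStr):
--         if elem not in loc.keys():
--             loc[elem] = [ind]
--         else:
--             loc[elem].append(ind)
--     return loc
-- ===== SOURCE B (Python) =====
-- def MapLocations(myStr):
--     return {elem: [i for i, e in enumerate(myStr) if e == elem]
--             for elem in dict.fromkeys(myStr)}
-- ===== Notes on version B (the rewrite author's own statement) =====
-- stated objective: idiomatic
-- what changed: Replaces A's incremental single-pass dict building (insert-or-append per element) with a dict comprehension over the first-occurrence unique keys that rescans the whole string per key to collect matching indices.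
import Mathlib
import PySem

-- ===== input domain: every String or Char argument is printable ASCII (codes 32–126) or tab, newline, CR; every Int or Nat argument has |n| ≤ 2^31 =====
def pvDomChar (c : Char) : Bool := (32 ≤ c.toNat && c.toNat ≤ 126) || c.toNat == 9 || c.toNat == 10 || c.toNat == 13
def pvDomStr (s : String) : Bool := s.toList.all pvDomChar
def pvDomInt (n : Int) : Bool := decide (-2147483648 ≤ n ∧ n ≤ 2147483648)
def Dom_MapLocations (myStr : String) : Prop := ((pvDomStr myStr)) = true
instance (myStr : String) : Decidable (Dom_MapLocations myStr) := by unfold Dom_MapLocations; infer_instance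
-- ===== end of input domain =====

-- B is the same grouping written as a dict comprehension over the unique elements with a
-- per-key rescan, instead of A's incremental single-pass insert-or-append; objective: idiomatic.

-- ===== PORT A =====
-- single pass over enumerate(myStr); each key (a 1-char string) is inserted on first sight,
-- appended to afterwards ('loc[elem].append(ind)' ported as Dict.modify, exact: the key is present)
def MapLocations (myStr : String) : List (String × List Int) :=
  ((PySem.List.enumerate myStr.toList 0).foldl
    (fun loc p =>
      let elem : String := String.ofList [p.2]
      if loc.contains elem then loc.modify elem [] (fun l => l ++ [p.1])
      else loc.insert elem [p.1])
    PySem.Dict.empty).items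

-- ===== PORT B =====
-- dict comprehension: unique keys in first-occurrence order (dict.fromkeys = PySem.List.dedup),
-- inner comprehension rescans enumerate(myStr) for each key
def MapLocations_alt (myStr : String) : List (String × List Int) :=
  (PySem.List.dedup (myStr.toList.map (fun c => String.ofList [c]))).map
    (fun elem =>
      (elem,
       ((PySem.List.enumerate myStr.toList 0).filter
          (fun p => String.ofList [p.2] == elem)).map (fun p => p.1)))

-- ===== PRECONDITION & SPEC =====
def Spec_MapLocations (myStr : String) (out : List (String × List Int)) : Prop := out = MapLocations_alt myStr
instance (myStr : String) (out : List (String × List Int)) : Decidable (Spec_MapLocations myStr out) := by unfold Spec_MapLocations; infer_instance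

-- ===== CLAIM (what is proved, stated in full; the proofs are below) =====
def Claim_equal_MapLocations : Prop := ∀ (myStr : String), Dom_MapLocations myStr → Spec_MapLocations myStr (MapLocations myStr)

-- ===== LEMMAS AND PROOFS =====

-- A's branching step is exactly Dict.modify with default [] (insert on a fresh key = modify)
theorem pv_step_eq_modify (loc : PySem.Dict String (List Int)) (p : Int × Char) :
    (if loc.contains (String.ofList [p.2]) then
        loc.modify (String.ofList [p.2]) [] (fun l => l ++ [p.1])
      else loc.insert (String.ofList [p.2]) [p.1])
    = loc.modify (String.ofList [p.2]) [] (fun l => l ++ [p.1]) := by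
  by_cases h : loc.contains (String.ofList [p.2]) = true
  · simp [h]
  · simp only [Bool.not_eq_true] at h
    simp [h, PySem.Dict.modify, PySem.Dict.getD_of_not_contains loc [] h]

theorem MapLocations_eq_alt (myStr : String) :
    MapLocations myStr = MapLocations_alt myStr := by
  unfold MapLocations MapLocations_alt
  simp only [pv_step_eq_modify]
  set cs := myStr.toList with hcs
  set l := PySem.List.enumerate cs 0 with hl
  -- rewrite the fold as a fold over the (key, value) pairs
  have hfold :
      l.foldl (fun loc p => loc.modify (String.ofList [p.2]) [] (fun v => v ++ [p.1]))
        PySem.Dict.empty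
      = (l.map (fun p => (String.ofList [p.2], p.1))).foldl
          (fun loc q => loc.modify q.1 [] (fun v => v ++ [q.2])) PySem.Dict.empty := by
    rw [List.foldl_map]
  rw [hfold]
  set m := l.map (fun p => (String.ofList [p.2], p.1)) with hm
  set d := m.foldl (fun loc q => loc.modify q.1 [] (fun v => v ++ [q.2])) PySem.Dict.empty with hd
  have hnodup : d.keys.Nodup := by
    rw [hd]
    exact PySem.Dict.nodup_keys_foldl_modify_key m (fun q => q.1) []
      (fun _ q v => v ++ [q.2]) PySem.Dict.empty (by simp)
  have hkeys : d.keys = PySem.Set.ofList (cs.map (fun c => String.ofList [c])) := by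
    rw [hd]
    have := PySem.Dict.keys_foldl_modify_key m (fun q => q.1) []
      (fun _ q v => v ++ [q.2]) PySem.Dict.empty
    rw [this]
    have hmk : m.map (fun q => q.1) = cs.map (fun c => String.ofList [c]) := by
      rw [hm, List.map_map, hl]
      have h2 : ((fun q : String × Int => q.1) ∘ fun p : Int × Char => (String.ofList [p.2], p.1))
          = (fun c : Char => String.ofList [c]) ∘ (fun p : Int × Char => p.2) := rfl
      rw [h2, ← List.map_map, PySem.List.map_snd_enumerate]
    rw [hmk]
    rfl
  rw [PySem.Dict.items_eq_map_keys d hnodup [], hkeys, PySem.List.dedup_eq_ofList]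
  refine List.map_congr_left (fun k _ => ?_) 
  have hgetD : d.getD k [] = (l.filter (fun p => String.ofList [p.2] == k)).map (fun p => p.1) := by
    rw [hd, PySem.Dict.getD_foldl_modify_append m PySem.Dict.empty k]
    rw [hm, List.filter_map]
    simp only [List.map_map]
    rfl
  rw [hgetD]

-- ===== VERDICT (by name: the statement is the Claim_ definition above) =====
theorem MapLocations_spec : Claim_equal_MapLocations := by
  intro myStr _
  unfold Spec_MapLocations
  exact MapLocations_eq_alt myStr
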